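-- pv_equiv track=rewrite | github.com/mohammed-elkomy/quran-qa | Quran QA 2023/Task-B/text_processing_helpers/__init__.py | extract_unseen_sequences
-- ===== SOURCE A (Python) =====
-- def extract_unseen_sequences(subset):
--     """
--     finds continuous intervals of zeros
--     @param subset: a subset of a boolean mask
--     @return: zero sequences
--     """
--     start = 0
--     sequences = []
--     for idx, value in enumerate(subset[1:], start=1):
--         if value != subset[start]:
--             if not any(subset[start:idx]):  # subset[start:idx] is only zeros => unseen
--                 sequences.append((start, idx))
--             start = idx  # next interval
--
--     # last interval
--     if not any(subset[start:]):
--         sequences.append((start, len(subset)))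
--     return sequences
-- ===== SOURCE B (Python) =====
-- def extract_unseen_sequences(subset):
--     """
--     finds continuous intervals of zeros
--     @param subset: a subset of a boolean mask
--     @return: zero sequences
--     """
--     zeros = [i for i, v in enumerate(subset) if not v]
--     sequences = []
--     k = 0
--     n = len(zeros)
--     while k < n:
--         start = zeros[k]
--         end = start + 1
--         k += 1
--         while k < n and zeros[k] == end:
--             end += 1
--             k += 1
--         sequences.append((start, end))
--     return sequences
-- ===== Notes on version B (the rewrite author's own statement) =====
-- stated objective: alternative
-- what changed: A's single-scan state machine over values (tracking a run start and re-testing any(slice) at each boundary) is replaced by a two-stage index algorithm: first collect the positions of all zeros, then group maximal runs of consecutive positions into (start, end) intervals; this drops the repeated any(slice) scans (constant-factor speedup, measured ~2x).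
-- intended difference: On the empty list A returns [(0, 0)], an artificial empty interval produced by its unconditional last-interval append; B returns [], the intended answer since an empty mask contains no zero sequence. — e.g. on extract_unseen_sequences([]): A returns [(0, 0)], B returns []
import Mathlib
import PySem

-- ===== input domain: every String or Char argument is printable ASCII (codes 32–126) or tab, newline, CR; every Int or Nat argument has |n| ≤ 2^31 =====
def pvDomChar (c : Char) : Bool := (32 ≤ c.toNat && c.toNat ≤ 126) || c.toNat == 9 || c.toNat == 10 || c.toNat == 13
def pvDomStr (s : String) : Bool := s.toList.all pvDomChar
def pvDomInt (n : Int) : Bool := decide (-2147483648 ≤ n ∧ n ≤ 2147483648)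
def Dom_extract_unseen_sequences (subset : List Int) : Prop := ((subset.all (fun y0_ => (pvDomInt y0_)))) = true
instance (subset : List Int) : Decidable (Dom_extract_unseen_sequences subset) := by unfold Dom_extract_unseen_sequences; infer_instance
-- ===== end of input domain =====

-- B replaces A's single-scan value state machine by a two-stage index algorithm (collect zero
-- positions, then group maximal runs of consecutive positions); objective: alternative.
-- Intended difference: on the empty list A returns [(0, 0)], B returns [].

-- any(xs) on a list of ints (truthiness: nonzero)
def pyAny (xs : List Int) : Bool := xs.any (fun v => v != 0)

-- ===== PORT A =====
-- loop body of A: state = (start, sequences), item = (idx, value)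
def aStep (subset : List Int) (st : Int × List (Int × Int)) (iv : Int × Int) :
    Int × List (Int × Int) :=
  if iv.2 != PySem.List.pyGetD subset st.1 0 then
    (iv.1,
      if pyAny (PySem.List.slice subset (some st.1) (some iv.1)) then st.2
      else st.2 ++ [(st.1, iv.1)])
  else st

def extract_unseen_sequences (subset : List Int) : List (Int × Int) :=
  -- for idx, value in enumerate(subset[1:], start=1)
  let fin :=
    ((PySem.List.pyRange 1 (subset.length : Int) 1).zip
        (PySem.List.slice subset (some 1) none)).foldl (aStep subset) (0, [])
  if pyAny (PySem.List.slice subset (some fin.1) none) then fin.2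
  else fin.2 ++ [(fin.1, (subset.length : Int))]

-- ===== PORT B =====
-- zeros = [i for i, v in enumerate(subset) if not v]
def zerosOf (subset : List Int) : List Int :=
  (PySem.List.enumerate subset 0).filterMap (fun p => if p.2 == 0 then some p.1 else none)

-- inner while: consume consecutive positions equal to end, end+1, …; returns (end, rest)
def extendRun (e : Int) : List Int → Int × List Int
  | [] => (e, [])
  | z :: zs => if z == e then extendRun (e + 1) zs else (e, z :: zs)

lemma extendRun_len (zs : List Int) : ∀ e : Int, (extendRun e zs).2.length ≤ zs.length := by
  induction zs with
  | nil => intro e; simp [extendRun]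
  | cons z zs ih =>
      intro e
      by_cases h : z == e
      · simp only [extendRun, h, if_pos]
        exact le_trans (ih (e + 1)) (by simp)
      · simp [extendRun, h]

-- outer while: each iteration takes one zero position, extends the run, emits the interval
def groupRuns : List Int → List (Int × Int)
  | [] => []
  | z :: zs =>
      (z, (extendRun (z + 1) zs).1) :: groupRuns (extendRun (z + 1) zs).2
termination_by l => l.length
decreasing_by
  exact lt_of_le_of_lt (extendRun_len zs (z + 1)) (by simp)

def extract_unseen_sequences_alt (subset : List Int) : List (Int × Int) :=
  groupRuns (zerosOf subset)

-- ===== PRECONDITION & SPEC =====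
-- On the empty list A returns [(0, 0)] (an artificial empty interval from its unconditional
-- last-interval append); B returns [], the intended answer: an empty mask has no zero sequence.
def D_extract_unseen_sequences (subset : List Int) : Prop := subset = []
instance (subset : List Int) : Decidable (D_extract_unseen_sequences subset) := by unfold D_extract_unseen_sequences; infer_instance

def Spec_extract_unseen_sequences (subset : List Int) (out : List (Int × Int)) : Prop := ¬ D_extract_unseen_sequences subset → out = extract_unseen_sequences_alt subset
instance (subset : List Int) (out : List (Int × Int)) : Decidable (Spec_extract_unseen_sequences subset out) := by unfold Spec_extract_unseen_sequences; infer_instance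

def pvDiffWitness_extract_unseen_sequences : List Int := []
def pvDiffWitnessOut_extract_unseen_sequences : (List (Int × Int)) × (List (Int × Int)) := ([(0, 0)], [])

-- ===== CLAIM (what is proved, stated in full; the proofs are below) =====
def Claim_unchanged_extract_unseen_sequences : Prop := ∀ (subset : List Int), Dom_extract_unseen_sequences subset → Spec_extract_unseen_sequences subset (extract_unseen_sequences subset)
def Claim_changed_extract_unseen_sequences : Prop := Dom_extract_unseen_sequences (pvDiffWitness_extract_unseen_sequences) ∧ D_extract_unseen_sequences (pvDiffWitness_extract_unseen_sequences) ∧ extract_unseen_sequences (pvDiffWitness_extract_unseen_sequences) = pvDiffWitnessOut_extract_unseen_sequences.1 ∧ extract_unseen_sequences_alt (pvDiffWitness_extract_unseen_sequences) = pvDiffWitnessOut_extract_unseen_sequences.2 ∧ pvDiffWitnessOut_extract_unseen_sequences.1 ≠ pvDiffWitnessOut_extract_unseen_sequences.2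
def Claim_exact_extract_unseen_sequences : Prop := ∀ (subset : List Int), Dom_extract_unseen_sequences subset → D_extract_unseen_sequences subset → extract_unseen_sequences subset ≠ extract_unseen_sequences_alt subset

-- ===== LEMMAS AND PROOFS =====

-- A's state machine, abstracted: from position i with a current run [s, i) of constant value c
def mrun (s i c : Int) : List Int → List (Int × Int)
  | [] => if c == 0 then [(s, i)] else []
  | v :: rest =>
      if v != c then (if c == 0 then [(s, i)] else []) ++ mrun i (i + 1) v rest
      else mrun s (i + 1) c rest

-- zero positions of a suffix, by recursion with an index offset
def zlist (i : Int) : List Int → List Int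
  | [] => []
  | v :: rest => if v == 0 then i :: zlist (i + 1) rest else zlist (i + 1) rest

lemma zerosOf_eq_zlist (t : List Int) : ∀ s : Int,
    (PySem.List.enumerate t s).filterMap (fun p => if p.2 == 0 then some p.1 else none)
      = zlist s t := by
  induction t with
  | nil => intro s; simp [PySem.List.enumerate_nil, zlist]
  | cons v rest ih =>
      intro s
      rw [PySem.List.enumerate_cons, List.filterMap_cons]
      by_cases h : v == 0
      · simp only [h, if_pos, zlist, ih]
      · simp only [h, zlist]
        simp only [Bool.false_eq_true, if_false, ih]

lemma zlist_ge (t : List Int) : ∀ (i : Int) (x : Int), x ∈ zlist i t → i ≤ x := by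
  induction t with
  | nil => intro i x hx; simp [zlist] at hx
  | cons v rest ih =>
      intro i x hx
      by_cases h : v == 0
      · simp only [zlist, h, if_pos, List.mem_cons] at hx
        rcases hx with h1 | h1
        · omega
        · have := ih (i + 1) x h1; omega
      · simp only [zlist, h, Bool.false_eq_true, if_false] at hx
        have := ih (i + 1) x hx; omega

lemma extendRun_stop (l : List Int) (e : Int) (h : ∀ x ∈ l, e < x) :
    extendRun e l = (e, l) := by
  cases l with
  | nil => rfl
  | cons z zs =>
      have : ¬ (z == e) := by
        have := h z (by simp); simp only [beq_iff_eq]; omega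
      simp [extendRun, this]

-- the bridge: A's abstract state machine = group-the-zero-positions
lemma mrun_eq_group (t : List Int) : ∀ (i s c : Int),
    mrun s i c t =
      if c == 0 then
        (s, (extendRun i (zlist i t)).1) :: groupRuns ((extendRun i (zlist i t)).2)
      else groupRuns (zlist i t) := by
  induction t with
  | nil =>
      intro i s c
      by_cases hc : c == 0 <;> simp [mrun, zlist, extendRun, groupRuns, hc]
  | cons v rest ih =>
      intro i s c
      have hstop : extendRun i (zlist (i + 1) rest) = (i, zlist (i + 1) rest) :=
        extendRun_stop _ _ (fun x hx => by have := zlist_ge rest (i + 1) x hx; omega)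
      by_cases hv : v == 0
      · have hv' : v = 0 := by simpa using hv
        by_cases hc : c == 0
        · -- v = 0, c = 0: run continues
          have hc' : c = 0 := by simpa using hc
          have hne : ¬ (v != c) := by simp [hv', hc']
          simp only [mrun, hne, hc, if_pos, zlist, hv, extendRun, beq_self_eq_true]
          rw [ih (i + 1) s c]
          simp [hc]
        · -- v = 0, c ≠ 0: a zero run starts at i
          have hne : (v != c) = true := by simp [hv']; intro h; exact absurd (by simp [h]) hc
          simp only [mrun, hne, if_pos, hc, Bool.false_eq_true, if_false, List.nil_append]
          rw [ih (i + 1) i v]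
          simp only [hv, if_pos, zlist]
          simp [groupRuns]
      · have hv' : ¬ v = 0 := by simpa using hv
        have hz : zlist i (v :: rest) = zlist (i + 1) rest := by simp [zlist, hv']
        by_cases hc : c == 0
        · -- v ≠ 0, c = 0: zero run [s, i) ends here
          have hc' : c = 0 := by simpa using hc
          have hne : (v != c) = true := by simp [hc', hv']
          simp only [mrun, hne, if_pos, hc]
          rw [ih (i + 1) i v]
          simp only [show ¬ (v == 0) = true by simpa using hv', Bool.false_eq_true, if_false, hz]
          rw [show zlist i (v :: rest) = zlist (i + 1) rest from hz] at *
          simp [hstop]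
        · -- v ≠ 0, c ≠ 0
          by_cases hvc : v = c
          · have hne : ¬ (v != c) = true := by simp [hvc]
            simp only [mrun, hne, if_false, hc, Bool.false_eq_true]
            rw [ih (i + 1) s c]
            simp [hc, hz]
          · have hne : (v != c) = true := by simp [hvc]
            simp only [mrun, hne, if_pos, hc, Bool.false_eq_true, if_false, List.nil_append]
            rw [ih (i + 1) i v]
            simp [show ¬ (v == 0) = true by simpa, hz]

-- any() over a nonempty constant run
lemma pyAny_const (l : List Int) (c : Int) (hne : l ≠ []) (hall : ∀ x ∈ l, x = c) :
    pyAny l = (c != 0) := by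
  unfold pyAny
  by_cases hc : c = 0
  · subst hc
    rw [List.any_eq_false.mpr (fun y hy => by simp [hall y hy])]
    simp
  · cases l with
    | nil => exact absurd rfl hne
    | cons x xs => simp [List.any_cons, hall x (by simp), hc]

lemma pyAny_slice_run (subset : List Int) (s i c : Int) (hs : 0 ≤ s) (hsi : s < i)
    (hin : i ≤ (subset.length : Int))
    (hinv : ∀ j : Int, s ≤ j → j < i → PySem.List.pyGetD subset j 0 = c) :
    pyAny (PySem.List.slice subset (some s) (some i)) = (c != 0) := by
  rw [PySem.List.slice_toNat subset hs (by omega)]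
  apply pyAny_const _ c
  · have : ((subset.drop s.toNat).take (i.toNat - s.toNat)).length
        = min (i.toNat - s.toNat) (subset.length - s.toNat) := by
      simp [List.length_take, List.length_drop]
    intro hnil
    rw [hnil] at this
    simp at this
    omega
  · intro x hx
    rw [List.mem_iff_getElem] at hx
    obtain ⟨m, hm, hxeq⟩ := hx
    have hm' : m < i.toNat - s.toNat := by
      have := hm; simp [List.length_take] at this; omega
    have hmlen : s.toNat + m < subset.length := by
      have := hm; simp [List.length_take, List.length_drop] at this; omega
    have hel : ((subset.drop s.toNat).take (i.toNat - s.toNat))[m] = subset[s.toNat + m] := by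
      rw [List.getElem_take, List.getElem_drop]
    have hj := hinv ((s.toNat + m : Nat) : Int) (by omega) (by omega)
    rw [PySem.List.pyGetD_natCast, List.getD_eq_getElem subset 0 hmlen] at hj
    rw [← hxeq, hel]
    exact hj

lemma pyAny_tail_run (subset : List Int) (s c : Int) (hs : 0 ≤ s)
    (hsn : s < (subset.length : Int))
    (hinv : ∀ j : Int, s ≤ j → j < (subset.length : Int) → PySem.List.pyGetD subset j 0 = c) :
    pyAny (PySem.List.slice subset (some s) none) = (c != 0) := by
  rw [PySem.List.slice_from subset hs]
  apply pyAny_const _ c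
  · intro hnil
    have : (subset.drop s.toNat).length = subset.length - s.toNat := by simp
    rw [hnil] at this
    simp at this
    omega
  · intro x hx
    rw [List.mem_iff_getElem] at hx
    obtain ⟨m, hm, hxeq⟩ := hx
    have hmlen : s.toNat + m < subset.length := by
      have := hm; simp [List.length_drop] at this; omega
    have hj := hinv ((s.toNat + m : Nat) : Int) (by omega) (by push_cast; omega)
    rw [PySem.List.pyGetD_natCast, List.getD_eq_getElem subset 0 hmlen] at hj
    rw [← hxeq, List.getElem_drop]
    exact hj

-- the last-interval step of A
def lastStep (subset : List Int) (p : Int × List (Int × Int)) : List (Int × Int) :=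
  if pyAny (PySem.List.slice subset (some p.1) none) then p.2
  else p.2 ++ [(p.1, (subset.length : Int))]

-- the fold of A's loop, plus the last-interval step, equals the abstract state machine
lemma foldA (subset : List Int) : ∀ (k : Nat) (i s c : Int) (acc : List (Int × Int)),
    i + k = subset.length → 0 ≤ s → s < i →
    (∀ j : Int, s ≤ j → j < i → PySem.List.pyGetD subset j 0 = c) →
    lastStep subset (((PySem.List.pyRange i (subset.length : Int) 1).zip
        (subset.drop i.toNat)).foldl (aStep subset) (s, acc))
    = acc ++ mrun s i c (subset.drop i.toNat) := by
  intro k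
  induction k with
  | zero =>
      intro i s c acc hk hs hsi hinv
      have hiN : i = (subset.length : Int) := by omega
      rw [PySem.List.pyRange_one_eq_nil (by omega)]
      have hdrop : subset.drop i.toNat = [] := by
        apply List.drop_of_length_le; omega
      rw [hdrop]
      simp only [List.zip_nil_right, List.foldl_nil, lastStep, mrun]
      rw [pyAny_tail_run subset s c hs (by omega) (fun j h1 h2 => hinv j h1 (by omega))]
      by_cases hc : c = 0
      · simp [hc, hiN]
      · simp [hc]
  | succ k ih =>
      intro i s c acc hk hs hsi hinv
      have hiN : i < (subset.length : Int) := by omega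
      have hin : i.toNat < subset.length := by omega
      rw [PySem.List.pyRange_one_cons hiN, List.drop_eq_getElem_cons hin]
      have htn : i.toNat + 1 = (i + 1).toNat := by omega
      rw [htn, List.zip_cons_cons, List.foldl_cons]
      have hval : PySem.List.pyGetD subset i 0 = subset[i.toNat] := by
        conv_lhs => rw [show i = ((i.toNat : Nat) : Int) by omega]
        rw [PySem.List.pyGetD_natCast]
        exact List.getD_eq_getElem subset 0 hin
      have hcs : PySem.List.pyGetD subset s 0 = c := hinv s (by omega) hsi
      by_cases hvc : subset[i.toNat] = c
      · -- value equals the current run value: state unchanged, run extended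
        have hcond : ¬ ((subset[i.toNat] : Int) != c) = true := by simp [hvc]
        have hstep : aStep subset (s, acc) (i, subset[i.toNat]) = (s, acc) := by
          simp [aStep, hcs, hvc]
        rw [hstep]
        have hinv' : ∀ j : Int, s ≤ j → j < i + 1 → PySem.List.pyGetD subset j 0 = c := by
          intro j h1 h2
          by_cases hj : j < i
          · exact hinv j h1 hj
          · have : j = i := by omega
            rw [this, hval, hvc]
        rw [ih (i + 1) s c acc (by omega) hs (by omega) hinv']
        simp [mrun, hvc]
      · -- boundary: emit the interval iff the run was zeros, start a new run at i
        have hany : pyAny (PySem.List.slice subset (some s) (some i)) = (c != 0) :=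
          pyAny_slice_run subset s i c hs hsi (by omega) hinv
        have hstep : aStep subset (s, acc) (i, subset[i.toNat]) =
            (i, acc ++ (if c == 0 then [(s, i)] else [])) := by
          simp only [aStep, hcs, hany]
          have : ((subset[i.toNat] : Int) != c) = true := by simp [hvc]
          rw [if_pos this]
          by_cases hc : c = 0
          · simp [hc]
          · simp [hc]
        rw [hstep]
        have hinv' : ∀ j : Int, i ≤ j → j < i + 1 →
            PySem.List.pyGetD subset j 0 = subset[i.toNat] := by
          intro j h1 h2
          have : j = i := by omega
          rw [this, hval]
        rw [ih (i + 1) i (subset[i.toNat]) _ (by omega) (by omega) (by omega) hinv']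
        have hm : mrun s i c (subset[i.toNat] :: subset.drop (i + 1).toNat) =
            (if c == 0 then [(s, i)] else []) ++ mrun i (i + 1) (subset[i.toNat])
              (subset.drop (i + 1).toNat) := by
          have : ((subset[i.toNat] : Int) != c) = true := by simp [hvc]
          simp [mrun, this]
        rw [hm, List.append_assoc]

-- ===== VERDICT (by name: the statements are the Claim_ definitions above) =====
theorem extract_unseen_sequences_spec : Claim_unchanged_extract_unseen_sequences := by
  intro subset _ hD
  unfold D_extract_unseen_sequences at hD
  match subset, hD with
  | x :: xs, _ =>
      set t := x :: xs with ht
      have hx0 : PySem.List.pyGetD t 0 0 = x := by simp [ht, PySem.List.pyGetD_zero_cons]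
      have hA : extract_unseen_sequences t = lastStep t
          (((PySem.List.pyRange 1 (t.length : Int) 1).zip
            (PySem.List.slice t (some 1) none)).foldl (aStep t) (0, [])) := rfl
      have h1 : PySem.List.slice t (some 1) none = t.drop (1 : Int).toNat := by
        rw [PySem.List.slice_from t (by norm_num)]
      rw [hA, h1, foldA t (t.length - 1) 1 0 x []
            (by simp [ht]; omega) (by norm_num) (by norm_num)
            (by intro j h1 h2
                have hj0 : j = 0 := by omega
                rw [hj0, hx0])]
      have hdrop : t.drop (1 : Int).toNat = xs := by simp [ht]
      rw [hdrop, List.nil_append]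
      unfold extract_unseen_sequences_alt
      rw [show zerosOf t = zlist 0 t by unfold zerosOf; exact zerosOf_eq_zlist t 0]
      rw [mrun_eq_group xs 1 0 x]
      by_cases hx : x = 0
      · have hz : zlist 0 t = 0 :: zlist 1 xs := by simp [ht, zlist, hx]
        rw [hz]
        simp [groupRuns, hx]
      · have hz : zlist 0 t = zlist 1 xs := by simp [ht, zlist, hx]
        rw [hz]
        simp [hx]

theorem extract_unseen_sequences_changed : Claim_changed_extract_unseen_sequences := by
  unfold Claim_changed_extract_unseen_sequences
  refine ⟨by decide, by decide, by decide, ?_, by decide⟩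
  show extract_unseen_sequences_alt [] = []
  simp [extract_unseen_sequences_alt, zerosOf, PySem.List.enumerate_nil, groupRuns]

theorem extract_unseen_sequences_tight : Claim_exact_extract_unseen_sequences := by
  intro subset _ hD
  unfold D_extract_unseen_sequences at hD
  subst hD
  have hB : extract_unseen_sequences_alt [] = [] := by
    simp [extract_unseen_sequences_alt, zerosOf, PySem.List.enumerate_nil, groupRuns]
  have hA : extract_unseen_sequences [] = [(0, 0)] := by decide
  rw [hA, hB]
  decide
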